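-- pv_equiv track=rewrite | github.com/Alamoris/search_prog | new_proj/chiper_test.py | decoding
-- ===== SOURCE A (Python) =====
-- def decoding(decoding_string, decode_dict):
--     decode_string = ''
--     for x in range(len(decoding_string)):
--         if x in decode_dict:
--             decode_string += decode_dict[x]
--         else:
--             decode_string += decoding_string[x]
--     return decode_string
-- ===== SOURCE B (Python) =====
-- def decoding(decoding_string, decode_dict):
--     chars = list(decoding_string)
--     for k, v in decode_dict.items():
--         if 0 <= k < len(decoding_string):
--             chars[k] = v
--     return ''.join(chars)
-- ===== Notes on version B (the rewrite author's own statement) =====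
-- stated objective: simpler
-- what changed: Instead of scanning every character and testing dict membership at each index, B builds a mutable list of the characters once and writes each in-range dict value directly into its index slot, then joins; Pre_ excludes association lists with duplicate keys, impossible for a real Python dict, on which A's first-match lookup and B's last-write overwrite are both accidental representations.
import Mathlib
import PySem

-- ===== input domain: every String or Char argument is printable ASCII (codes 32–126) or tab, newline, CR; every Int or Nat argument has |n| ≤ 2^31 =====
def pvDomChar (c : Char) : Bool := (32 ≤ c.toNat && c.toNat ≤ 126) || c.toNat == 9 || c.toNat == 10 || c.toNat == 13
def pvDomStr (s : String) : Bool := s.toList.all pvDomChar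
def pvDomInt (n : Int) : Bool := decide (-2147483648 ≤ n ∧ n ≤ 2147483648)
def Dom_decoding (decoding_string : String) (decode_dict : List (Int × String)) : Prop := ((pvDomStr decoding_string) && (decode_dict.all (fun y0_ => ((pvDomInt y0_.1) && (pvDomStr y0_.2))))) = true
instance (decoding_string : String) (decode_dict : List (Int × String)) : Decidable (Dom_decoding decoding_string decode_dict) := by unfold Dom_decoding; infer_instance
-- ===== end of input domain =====

-- B replaces A's per-character dict-membership scan by one direct write per dict entry into a
-- mutable character list; Pre_ excludes association lists with duplicate keys (impossible for a
-- real Python dict), where first-match vs last-write order is an artefact of the representation.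


-- ===== PORT A =====
-- for x in range(len(s)): decode_string += decode_dict[x] if x in decode_dict else s[x]
-- (x is always in range of s, so the `none` branch of pyGet? is unreachable)
def decoding (decoding_string : String) (decode_dict : List (Int × String)) : String :=
  let cs := decoding_string.toList
  String.ofList ((PySem.List.pyRange 0 (cs.length : Int)).foldl
    (fun acc x =>
      acc ++
        match (PySem.Dict.mk decode_dict).get? x with
        | some v => v.toList
        | none =>
          match PySem.List.pyGet? cs x with
          | some c => [c]
          | none => []) [])

-- ===== PORT B =====
-- chars = list(s); for k, v in decode_dict.items(): if 0 <= k < len(s): chars[k] = v; return ''.join(chars)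
def decoding_alt (decoding_string : String) (decode_dict : List (Int × String)) : String :=
  let cs := decoding_string.toList
  let chars : List (List Char) := cs.map (fun c => [c])
  String.ofList ((decode_dict.foldl
    (fun arr kv =>
      if 0 ≤ kv.1 ∧ kv.1 < (cs.length : Int) then arr.set kv.1.toNat kv.2.toList else arr)
    chars).flatten)

-- ===== PRECONDITION & SPEC =====
-- Pre_ excludes association lists with duplicate keys: a Python dict cannot contain them, and on
-- such lists A's first-match lookup and B's last-write overwrite are both accidental choices.
def Pre_decoding (decoding_string : String) (decode_dict : List (Int × String)) : Prop :=
  (decode_dict.map Prod.fst).Nodup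
instance (decoding_string : String) (decode_dict : List (Int × String)) : Decidable (Pre_decoding decoding_string decode_dict) := by unfold Pre_decoding; infer_instance

def pvWitness_decoding : String × (List (Int × String)) := ("abc", [((1 : Int), "XY"), ((5 : Int), "z"), ((-1 : Int), "w")])

def Spec_decoding (decoding_string : String) (decode_dict : List (Int × String)) (out : String) : Prop := out = decoding_alt decoding_string decode_dict
instance (decoding_string : String) (decode_dict : List (Int × String)) (out : String) : Decidable (Spec_decoding decoding_string decode_dict out) := by unfold Spec_decoding; infer_instance

-- ===== CLAIM (what is proved, stated in full; the proofs are below) =====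
def Claim_equal_decoding : Prop := ∀ (decoding_string : String) (decode_dict : List (Int × String)), Dom_decoding decoding_string decode_dict → Pre_decoding decoding_string decode_dict → Spec_decoding decoding_string decode_dict (decoding decoding_string decode_dict)

-- ===== LEMMAS AND PROOFS =====

-- a key absent from the association list looks up to none
theorem pv_get?_of_not_mem (d : List (Int × String)) (x : Int) (h : x ∉ d.map Prod.fst) :
    (PySem.Dict.mk d).get? x = none := by
  induction d with
  | nil => rfl
  | cons kv rest ih =>
    rw [PySem.Dict.get?_mk_cons]
    simp only [List.map_cons, List.mem_cons, not_or] at h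
    rw [if_neg (by simpa using fun e : kv.1 = x => h.1 e.symm), ih h.2]

-- B's write loop preserves the length of the array
theorem pv_fold_length (d : List (Int × String)) (L : List (List Char)) (n : Nat) (hL : L.length = n) :
    (d.foldl (fun arr kv =>
      if 0 ≤ kv.1 ∧ kv.1 < (n : Int) then arr.set kv.1.toNat kv.2.toList else arr) L).length = n := by
  induction d generalizing L with
  | nil => simpa using hL
  | cons kv rest ih =>
    simp only [List.foldl_cons]
    split
    · exact ih _ (by simpa using hL)
    · exact ih _ hL

-- with distinct keys, the final array holds the first-match lookup at each index
theorem pv_fold_get (d : List (Int × String)) (L : List (List Char)) (n i : Nat)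
    (hL : L.length = n) (hi : i < n) (hnd : (d.map Prod.fst).Nodup) :
    (d.foldl (fun arr kv =>
      if 0 ≤ kv.1 ∧ kv.1 < (n : Int) then arr.set kv.1.toNat kv.2.toList else arr) L)[i]? =
    (match (PySem.Dict.mk d).get? (i : Int) with
     | some v => some v.toList
     | none => L[i]?) := by
  induction d generalizing L with
  | nil => rfl
  | cons kv rest ih =>
    simp only [List.map_cons, List.nodup_cons] at hnd
    simp only [List.foldl_cons]
    rw [PySem.Dict.get?_mk_cons]
    by_cases hk : kv.1 = (i : Int)
    · have hrange : 0 ≤ kv.1 ∧ kv.1 < (n : Int) := by omega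
      rw [if_pos hrange, ih _ (by simpa using hL) hnd.2,
          pv_get?_of_not_mem rest _ (hk ▸ hnd.1),
          if_pos (show (kv.1 == (i : Int)) = true by simpa using hk)]
      have ht : kv.1.toNat = i := by omega
      rw [ht, List.getElem?_set_self (by omega)]
    · rw [if_neg (show ¬ (kv.1 == (i : Int)) = true by simpa using hk)]
      split
      · rename_i hg
        rw [ih _ (by simpa using hL) hnd.2,
            List.getElem?_set_ne (show kv.1.toNat ≠ i by omega)]
      · exact ih _ hL hnd.2

theorem decoding_spec : Claim_equal_decoding := by
  unfold Claim_equal_decoding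
  intro s d _ hpre
  unfold Spec_decoding decoding decoding_alt
  simp only
  congr 1
  set cs := s.toList with hcs
  set n := cs.length with hn
  -- A's loop is a flatMap over range n
  rw [PySem.List.pyRange_zero_natCast,
      PySem.List.foldl_append_eq_flatMap
        (g := fun x =>
          match (PySem.Dict.mk d).get? x with
          | some v => v.toList
          | none =>
            match PySem.List.pyGet? cs x with
            | some c => [c]
            | none => [])]
  simp only [List.nil_append, List.flatMap_map]
  -- B's array equals the per-index values of A's flatMap body
  have harr : (d.foldl (fun arr kv =>
      if 0 ≤ kv.1 ∧ kv.1 < (n : Int) then arr.set kv.1.toNat kv.2.toList else arr)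
      (cs.map (fun c => [c]))) =
      (List.range n).map (fun (i : Nat) =>
        match (PySem.Dict.mk d).get? (i : Int) with
        | some v => v.toList
        | none =>
          match cs[i]? with
          | some c => [c]
          | none => []) := by
    apply List.ext_getElem?
    intro i
    by_cases hi : i < n
    · rw [pv_fold_get d _ n i (by simp [hn]) hi hpre]
      have hcsi : cs[i]? = some cs[i] := List.getElem?_eq_getElem (by omega)
      rcases hg : (PySem.Dict.mk d).get? (i : Int) with _ | v <;>
        simp [hg, hcsi, List.getElem?_range hi]
    · rw [List.getElem?_eq_none, List.getElem?_eq_none]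
      · simp [List.length_map]; omega
      · rw [pv_fold_length d _ n (by simp [hn])]; omega
  rw [harr]
  simp only [PySem.List.pyGet?_natCast]
  rw [List.flatMap_def]
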